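-- pv_equiv track=rewrite | github.com/Siddhartha-Mahajan/verifier | helper/hpprotein.py | _count_hh_contacts
-- ===== SOURCE A (Python) =====
-- def _manhattan(a: tuple[int, int], b: tuple[int, int]) -> int:
--     return abs(a[0] - b[0]) + abs(a[1] - b[1])
--
-- def _count_hh_contacts(sequence: str, coords: list[tuple[int, int]]) -> int:
--     count = 0
--     n = len(sequence)
--     for i in range(n):
--         if sequence[i] != "H":
--             continue
--         for j in range(i + 2, n):
--             if sequence[j] != "H":
--                 continue
--             if _manhattan(coords[i], coords[j]) == 1:
--                 count += 1
--     return count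
-- ===== SOURCE B (Python) =====
-- def _count_hh_contacts(sequence: str, coords: list[tuple[int, int]]) -> int:
--     # One pass with a coordinate -> count hashmap of H residues seen at least
--     # two sequence positions back; each H probes its 4 lattice neighbours
--     # instead of scanning all later H residues.
--     seen = {}
--     count = 0
--     for j in range(len(sequence)):
--         if j >= 2 and sequence[j - 2] == "H":
--             c = coords[j - 2]
--             seen[c] = seen.get(c, 0) + 1
--         if sequence[j] == "H":
--             x, y = coords[j]
--             count += (seen.get((x + 1, y), 0) + seen.get((x - 1, y), 0)
--                       + seen.get((x, y + 1), 0) + seen.get((x, y - 1), 0))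
--     return count
-- ===== Notes on version B (the rewrite author's own statement) =====
-- stated objective: alternative
-- what changed: Replaced the all-pairs scan over H residues with a single pass that maintains a coordinate-to-count hashmap of H residues seen at least two positions back and probes the 4 lattice neighbours of each H.
-- outside the precondition, e.g. on _count_hh_contacts('H', []): A returns 0, B raises IndexError
import Mathlib
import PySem

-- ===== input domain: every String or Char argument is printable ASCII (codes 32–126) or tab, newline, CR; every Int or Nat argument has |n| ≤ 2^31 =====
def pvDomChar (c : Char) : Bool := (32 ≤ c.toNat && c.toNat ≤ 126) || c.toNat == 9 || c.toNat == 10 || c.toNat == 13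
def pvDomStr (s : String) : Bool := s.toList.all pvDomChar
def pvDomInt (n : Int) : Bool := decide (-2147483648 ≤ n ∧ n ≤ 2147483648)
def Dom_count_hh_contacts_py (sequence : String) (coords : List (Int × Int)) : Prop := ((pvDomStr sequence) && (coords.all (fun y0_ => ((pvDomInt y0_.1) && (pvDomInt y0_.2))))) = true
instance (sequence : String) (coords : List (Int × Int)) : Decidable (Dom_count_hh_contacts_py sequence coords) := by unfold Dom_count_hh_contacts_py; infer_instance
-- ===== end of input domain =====

-- B counts the same H-H contacts by a different algorithm: a single pass with a
-- coordinate→count hashmap of H residues seen ≥ 2 positions back, probing the 4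
-- lattice neighbours of each H, instead of A's all-pairs scan.

-- ===== PORT A =====
def pyManhattan (a : Int × Int) (b : Int × Int) : Int :=
  |a.1 - b.1| + |a.2 - b.2|

def count_hh_contacts_py (sequence : String) (coords : List (Int × Int)) : Int :=
  let n : Int := PySem.Str.len sequence
  (PySem.List.pyRange 0 n 1).foldl (fun count i =>
    if PySem.Str.pyGet? sequence i ≠ some 'H' then count
    else
      (PySem.List.pyRange (i + 2) n 1).foldl (fun count j =>
        if PySem.Str.pyGet? sequence j ≠ some 'H' then count
        else if pyManhattan (PySem.List.pyGetD coords i ((0 : Int), (0 : Int)))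
                  (PySem.List.pyGetD coords j ((0 : Int), (0 : Int))) = 1 then count + 1
        else count) count) 0

-- ===== PORT B =====
def count_hh_contacts_py_alt (sequence : String) (coords : List (Int × Int)) : Int :=
  let n : Int := PySem.Str.len sequence
  let r := (PySem.List.pyRange 0 n 1).foldl
    (fun (st : PySem.Dict (Int × Int) Int × Int) j =>
      let seen :=
        if 2 ≤ j ∧ PySem.Str.pyGet? sequence (j - 2) = some 'H' then
          let c := PySem.List.pyGetD coords (j - 2) ((0 : Int), (0 : Int))
          st.1.insert c (st.1.getD c 0 + 1)
        else st.1
      let count :=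
        if PySem.Str.pyGet? sequence j = some 'H' then
          let xy := PySem.List.pyGetD coords j ((0 : Int), (0 : Int))
          st.2 + (seen.getD (xy.1 + 1, xy.2) 0 + seen.getD (xy.1 - 1, xy.2) 0
                + seen.getD (xy.1, xy.2 + 1) 0 + seen.getD (xy.1, xy.2 - 1) 0)
        else st.2
      (seen, count)) (PySem.Dict.empty, 0)
  r.2

-- ===== PRECONDITION & SPEC =====
-- Pre_ excludes inputs with an 'H' at an index ≥ len(coords): on most of them A raises
-- IndexError, but when such an H has no partner to scan A still returns (see cites) while
-- B, which needs every H's coordinate, raises there.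
def Pre_count_hh_contacts_py (sequence : String) (coords : List (Int × Int)) : Prop :=
  'H' ∉ sequence.toList.drop coords.length
instance (sequence : String) (coords : List (Int × Int)) : Decidable (Pre_count_hh_contacts_py sequence coords) := by unfold Pre_count_hh_contacts_py; infer_instance

def pvWitness_count_hh_contacts_py : String × (List (Int × Int)) :=
  ("HPHH", [(0, 0), (1, 0), (1, 1), (0, 1)])

def Spec_count_hh_contacts_py (sequence : String) (coords : List (Int × Int)) (out : Int) : Prop := out = count_hh_contacts_py_alt sequence coords
instance (sequence : String) (coords : List (Int × Int)) (out : Int) : Decidable (Spec_count_hh_contacts_py sequence coords out) := by unfold Spec_count_hh_contacts_py; infer_instance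

-- ===== CLAIM (what is proved, stated in full; the proofs are below) =====
def Claim_equal_count_hh_contacts_py : Prop := ∀ (sequence : String) (coords : List (Int × Int)), Dom_count_hh_contacts_py sequence coords → Pre_count_hh_contacts_py sequence coords → Spec_count_hh_contacts_py sequence coords (count_hh_contacts_py sequence coords)

-- ===== LEMMAS AND PROOFS =====

-- the contribution of the ordered pair (i, j): 1 exactly when both are H, j ≥ i+2 and adjacent
def pairE (cs : List Char) (coords : List (Int × Int)) (i j : Nat) : Int :=
  if cs[i]? = some 'H' ∧ cs[j]? = some 'H' ∧ i + 2 ≤ j ∧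
     pyManhattan (coords.getD i ((0 : Int), (0 : Int))) (coords.getD j ((0 : Int), (0 : Int))) = 1
  then 1 else 0
theorem innerA (seq : String) (coords : List (Int × Int)) (i : Nat)
    (hi : seq.toList[i]? = some 'H') (M : Nat) (acc : Int) :
    (PySem.List.pyRange ((i : Int) + 2) (M : Int) 1).foldl
      (fun count j =>
        if PySem.Str.pyGet? seq j ≠ some 'H' then count
        else if pyManhattan (PySem.List.pyGetD coords (i : Int) ((0 : Int), (0 : Int)))
                  (PySem.List.pyGetD coords j ((0 : Int), (0 : Int))) = 1 then count + 1
        else count) acc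
    = acc + ∑ j ∈ Finset.range M, pairE seq.toList coords i j := by
  induction M generalizing acc with
  | zero =>
    rw [show ((0 : Nat) : Int) = 0 from rfl, PySem.List.pyRange_one_eq_nil (by positivity)]
    simp
  | succ M ih =>
    by_cases hM : i + 2 ≤ M
    · rw [show ((M + 1 : Nat) : Int) = (M : Int) + 1 by push_cast; ring,
        PySem.List.pyRange_one_succ_right (by exact_mod_cast hM), List.foldl_append, ih]
      simp only [List.foldl_cons, List.foldl_nil, PySem.Str.pyGet?_natCast,
        PySem.List.pyGetD_natCast, Finset.sum_range_succ]
      by_cases hHM : seq.toList[M]? = some 'H'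
      · by_cases hd : pyManhattan (coords.getD i ((0:Int),(0:Int))) (coords.getD M ((0:Int),(0:Int))) = 1
        · rw [if_neg (by simp [hHM]), if_pos hd, pairE, if_pos ⟨hi, hHM, hM, hd⟩]; ring
        · rw [if_neg (by simp [hHM]), if_neg hd, pairE, if_neg (by rintro ⟨_, _, _, h⟩; exact hd h)]
          ring
      · rw [if_pos (by simp [hHM]), pairE, if_neg (by rintro ⟨_, h, _, _⟩; exact hHM h)]; ring
    · rw [PySem.List.pyRange_one_eq_nil (by push_cast; omega), List.foldl_nil]
      rw [Finset.sum_eq_zero, add_zero]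
      intro j hj
      rw [pairE, if_neg]
      rintro ⟨_, _, h, _⟩
      have := Finset.mem_range.mp hj
      omega

theorem outerA (seq : String) (coords : List (Int × Int)) (N : Nat) (acc : Int) :
    (PySem.List.pyRange 0 (N : Int) 1).foldl
      (fun count i =>
        if PySem.Str.pyGet? seq i ≠ some 'H' then count
        else
          (PySem.List.pyRange (i + 2) ((seq.toList.length : Nat) : Int) 1).foldl
            (fun count j =>
              if PySem.Str.pyGet? seq j ≠ some 'H' then count
              else if pyManhattan (PySem.List.pyGetD coords i ((0 : Int), (0 : Int)))
                        (PySem.List.pyGetD coords j ((0 : Int), (0 : Int))) = 1 then count + 1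
              else count) count) acc
    = acc + ∑ i ∈ Finset.range N, ∑ j ∈ Finset.range seq.toList.length, pairE seq.toList coords i j := by
  induction N with
  | zero =>
    rw [show ((0 : Nat) : Int) = 0 from rfl, PySem.List.pyRange_one_eq_nil le_rfl]
    simp
  | succ N ih =>
    rw [show ((N + 1 : Nat) : Int) = (N : Int) + 1 by push_cast; ring,
      PySem.List.pyRange_one_succ_right (by positivity), List.foldl_append, ih]
    simp only [List.foldl_cons, List.foldl_nil, PySem.Str.pyGet?_natCast]
    rw [Finset.sum_range_succ]
    by_cases hH : seq.toList[N]? = some 'H'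
    · rw [if_neg (by simp [hH]), innerA seq coords N hH seq.toList.length]; ring
    · rw [if_pos (by simp [hH])]
      have hz : ∑ j ∈ Finset.range seq.toList.length, pairE seq.toList coords N j = 0 :=
        Finset.sum_eq_zero fun j hj => by
          simp only [pairE]; rw [if_neg]; rintro ⟨h, _⟩; exact hH h
      rw [hz]; ring
theorem A_eq (seq : String) (coords : List (Int × Int)) :
    count_hh_contacts_py seq coords
    = ∑ i ∈ Finset.range seq.toList.length, ∑ j ∈ Finset.range seq.toList.length, pairE seq.toList coords i j := by
  simp only [count_hh_contacts_py, PySem.Str.len_eq]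
  rw [outerA, zero_add]

theorem nbr_point (p : Int × Int) (x y : Int) (P : Prop) [Decidable P] :
    ((if P ∧ p = (x + 1, y) then (1 : Int) else 0) + (if P ∧ p = (x - 1, y) then 1 else 0)
     + (if P ∧ p = (x, y + 1) then 1 else 0) + (if P ∧ p = (x, y - 1) then 1 else 0))
    = if P ∧ pyManhattan p (x, y) = 1 then 1 else 0 := by
  obtain ⟨a, b⟩ := p
  by_cases hP : P
  · simp only [hP, true_and, pyManhattan, Prod.mk.injEq]
    rw [Int.abs_eq_natAbs, Int.abs_eq_natAbs]
    split_ifs <;> omega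
  · simp [hP]
def seenInv (cs : List Char) (coords : List (Int × Int)) (N : Nat) (d : PySem.Dict (Int × Int) Int) : Prop :=
  ∀ v : Int × Int, d.getD v 0
    = ∑ i ∈ Finset.range (N - 2),
        (if cs[i]? = some 'H' ∧ coords.getD i ((0 : Int), (0 : Int)) = v then (1 : Int) else 0)
theorem stepSeen (seq : String) (coords : List (Int × Int)) (N : Nat)
    (d : PySem.Dict (Int × Int) Int) (ih1 : seenInv seq.toList coords N d) :
    seenInv seq.toList coords (N + 1)
      (if 2 ≤ (N : Int) ∧ PySem.Str.pyGet? seq ((N : Int) - 2) = some 'H' then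
        d.insert (PySem.List.pyGetD coords ((N : Int) - 2) ((0 : Int), (0 : Int)))
          (d.getD (PySem.List.pyGetD coords ((N : Int) - 2) ((0 : Int), (0 : Int))) 0 + 1)
      else d) := by
  intro v
  by_cases hg : 2 ≤ (N : Int) ∧ PySem.Str.pyGet? seq ((N : Int) - 2) = some 'H'
  · have hN2 : 2 ≤ N := by exact_mod_cast hg.1
    have hcast : ((N : Int) - 2) = ((N - 2 : Nat) : Int) := by omega
    have hg' : seq.toList[N - 2]? = some 'H' := by
      have h2 := hg.2; rwa [hcast, PySem.Str.pyGet?_natCast] at h2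
    rw [if_pos hg, hcast, PySem.List.pyGetD_natCast, PySem.Dict.getD_insert,
      show N + 1 - 2 = (N - 2) + 1 from by omega, Finset.sum_range_succ]
    by_cases hv : v = coords.getD (N - 2) ((0 : Int), (0 : Int))
    · rw [if_pos hv, hv, ih1, if_pos ⟨hg', rfl⟩]
    · rw [if_neg hv, ih1, if_neg (fun h => hv h.2.symm), add_zero]
  · rw [if_neg hg, ih1 v]
    rcases Nat.lt_or_ge N 2 with hN | hN
    · rw [show N + 1 - 2 = N - 2 from by omega]
    · have hcast : ((N : Int) - 2) = ((N - 2 : Nat) : Int) := by omega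
      have hs : ¬ seq.toList[N - 2]? = some 'H' := by
        intro h
        exact hg ⟨by exact_mod_cast hN, by rw [hcast, PySem.Str.pyGet?_natCast]; exact h⟩
      rw [show N + 1 - 2 = (N - 2) + 1 from by omega, Finset.sum_range_succ,
        if_neg (fun h => hs h.1), add_zero]

theorem outerB (seq : String) (coords : List (Int × Int)) (N : Nat) :
    ∃ (d : PySem.Dict (Int × Int) Int) (c : Int),
      (PySem.List.pyRange 0 (N : Int) 1).foldl
        (fun (st : PySem.Dict (Int × Int) Int × Int) j =>
          let seen :=
            if 2 ≤ j ∧ PySem.Str.pyGet? seq (j - 2) = some 'H' then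
              let c := PySem.List.pyGetD coords (j - 2) ((0 : Int), (0 : Int))
              st.1.insert c (st.1.getD c 0 + 1)
            else st.1
          let count :=
            if PySem.Str.pyGet? seq j = some 'H' then
              let xy := PySem.List.pyGetD coords j ((0 : Int), (0 : Int))
              st.2 + (seen.getD (xy.1 + 1, xy.2) 0 + seen.getD (xy.1 - 1, xy.2) 0
                    + seen.getD (xy.1, xy.2 + 1) 0 + seen.getD (xy.1, xy.2 - 1) 0)
            else st.2
          (seen, count)) (PySem.Dict.empty, 0) = (d, c) ∧
      seenInv seq.toList coords N d ∧
      c = ∑ j ∈ Finset.range N, ∑ i ∈ Finset.range (j - 1), pairE seq.toList coords i j := by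
  induction N with
  | zero =>
    refine ⟨PySem.Dict.empty, 0, ?_, ?_, by simp⟩
    · rw [show ((0 : Nat) : Int) = 0 from rfl, PySem.List.pyRange_one_eq_nil le_rfl, List.foldl_nil]
    · intro v; simp
  | succ N ih =>
    obtain ⟨d, c, hdc, ih1, ih2⟩ := ih
    rw [show ((N + 1 : Nat) : Int) = (N : Int) + 1 by push_cast; ring,
      PySem.List.pyRange_one_succ_right (by positivity), List.foldl_append, hdc,
      List.foldl_cons, List.foldl_nil]
    dsimp only
    refine ⟨_, _, rfl, ?_, ?_⟩
    · exact stepSeen seq coords N d ih1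
    · have hS := stepSeen seq coords N d ih1
      rw [Finset.sum_range_succ, ← ih2]
      simp only [PySem.Str.pyGet?_natCast, PySem.List.pyGetD_natCast]
      by_cases hH : seq.toList[N]? = some 'H'
      · rw [if_pos hH]
        rcases hxy : coords.getD N ((0 : Int), (0 : Int)) with ⟨x, y⟩
        dsimp only
        rw [hS, hS, hS, hS, ← Finset.sum_add_distrib, ← Finset.sum_add_distrib,
          ← Finset.sum_add_distrib]
        congr 1
        apply Finset.sum_congr rfl
        intro i hi
        have hi' := Finset.mem_range.mp hi
        rw [nbr_point]
        have hij : i + 2 ≤ N := by omega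
        simp only [pairE, hH, hxy, hij, true_and]
      · rw [if_neg hH]
        have hz : ∑ i ∈ Finset.range (N - 1), pairE seq.toList coords i N = 0 :=
          Finset.sum_eq_zero fun i hi => by
            simp only [pairE]; rw [if_neg]; rintro ⟨_, h, _⟩; exact hH h
        rw [hz, add_zero]
theorem B_eq (seq : String) (coords : List (Int × Int)) :
    count_hh_contacts_py_alt seq coords
    = ∑ j ∈ Finset.range seq.toList.length, ∑ i ∈ Finset.range seq.toList.length, pairE seq.toList coords i j := by
  obtain ⟨d, c, hdc, _, h2⟩ := outerB seq coords seq.toList.length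
  simp only [count_hh_contacts_py_alt, PySem.Str.len_eq]
  rw [hdc]
  dsimp only
  rw [h2]
  apply Finset.sum_congr rfl
  intro j hj
  have hj' := Finset.mem_range.mp hj
  refine Finset.sum_subset ?_ ?_
  · intro x hx
    have hx' := Finset.mem_range.mp hx
    exact Finset.mem_range.mpr (by omega)
  intro i hi hni
  have hi' := Finset.mem_range.mp hi
  have hni' : ¬ i < j - 1 := fun h => hni (Finset.mem_range.mpr h)
  simp only [pairE]
  rw [if_neg]
  rintro ⟨_, _, h, _⟩
  exact hni' (by omega)

-- ===== VERDICT (by name: the statement is the Claim_ definition above) =====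
theorem count_hh_contacts_py_spec : Claim_equal_count_hh_contacts_py := by
  intro seq coords _ _
  unfold Spec_count_hh_contacts_py
  rw [A_eq, B_eq, Finset.sum_comm]
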